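-- pv_equiv track=rewrite | github.com/tashifkhan/placement-alerts-superset-telegram-notification-bot | modules/webscraping.py | extract_post_metadata_from_raw
-- ===== SOURCE A (Python) =====
-- def extract_post_metadata_from_raw(content_lines):
--     """Extract title, author, and posted time from raw content lines"""
--     title = "Untitled Post"
--     author = ""
--     posted_time = ""
--
--     for line in content_lines[:5]:
--
--         if (
--             any(
--                 pattern in line.lower()
--                 for pattern in [
--                     "open for applications",
--                     "hiring",
--                     "placement",
--                     "job",
--                     "internship",
--                     "hackathon",
--                     "campus connect",
--                     "webinar",
--                 ]
--             )
--             and len(line) > 20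
--         ):
--             title = line[:100]
--             break
--
--     author_names = [
--         "anurag srivastava",
--         "anita marwaha",
--         "vinod kumar",
--         "archita kumar",
--         "deeksha jain",
--         "placement team",
--         "sanjay dawar",
--         "breg. sanjay dawar",
--     ]
--     for line in content_lines:
--         if any(name in line.lower() for name in author_names):
--             author = line.strip()
--             break
--
--     time_keywords = [
--         "days ago",
--         "hours ago",
--         "minutes ago",
--         "yesterday",
--         "today",
--         "hrs",
--         "mins",
--         "ago",
--     ]
--     for line in content_lines:
--         if any(keyword in line.lower() for keyword in time_keywords):
--             posted_time = line.strip()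
--             break
--
--     return title, author, posted_time
-- ===== SOURCE B (Python) =====
-- TITLE_PATTERNS = [
--     "open for applications", "hiring", "placement", "job",
--     "internship", "hackathon", "campus connect", "webinar",
-- ]
-- AUTHOR_NAMES = [
--     "anurag srivastava", "anita marwaha", "vinod kumar", "archita kumar",
--     "deeksha jain", "placement team", "sanjay dawar", "breg. sanjay dawar",
-- ]
-- TIME_KEYWORDS = [
--     "days ago", "hours ago", "minutes ago", "yesterday",
--     "today", "hrs", "mins", "ago",
-- ]
--
--
-- def extract_post_metadata_from_raw(content_lines):
--     """Extract title, author, and posted time from raw content lines (single pass)."""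
--     title = author = posted_time = None
--     for idx, line in enumerate(content_lines):
--         low = line.lower()
--         if title is None and idx < 5 and len(line) > 20 and any(p in low for p in TITLE_PATTERNS):
--             title = line[:100]
--         if author is None and any(n in low for n in AUTHOR_NAMES):
--             author = line.strip()
--         if posted_time is None and any(k in low for k in TIME_KEYWORDS):
--             posted_time = line.strip()
--         if title is not None and author is not None and posted_time is not None:
--             break
--     return (title if title is not None else "Untitled Post",
--             author if author is not None else "",
--             posted_time if posted_time is not None else "")
-- ===== Notes on version B (the rewrite author's own statement) =====
-- stated objective: alternative
-- what changed: Replaces A's three sequential scans over the lines with one fused pass that tracks all three fields as Optionals and stops as soon as all are found.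
import Mathlib
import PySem

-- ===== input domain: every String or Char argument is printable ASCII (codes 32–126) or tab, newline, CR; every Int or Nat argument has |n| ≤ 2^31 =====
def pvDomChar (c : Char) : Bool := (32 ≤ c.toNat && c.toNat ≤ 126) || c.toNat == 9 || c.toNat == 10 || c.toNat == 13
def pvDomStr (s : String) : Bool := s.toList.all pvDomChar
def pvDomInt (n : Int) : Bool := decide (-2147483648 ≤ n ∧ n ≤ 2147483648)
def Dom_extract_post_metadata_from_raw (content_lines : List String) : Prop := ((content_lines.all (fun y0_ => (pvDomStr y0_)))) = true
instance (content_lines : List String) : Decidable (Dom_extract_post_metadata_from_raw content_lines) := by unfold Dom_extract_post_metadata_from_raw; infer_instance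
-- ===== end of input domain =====

-- B replaces A's three sequential scans with one fused pass holding Option accumulators
-- and an early exit once all three fields are found (objective: alternative; same cost).

-- ===== PORT A =====
def titlePatterns : List String :=
  ["open for applications", "hiring", "placement", "job",
   "internship", "hackathon", "campus connect", "webinar"]

def authorNames : List String :=
  ["anurag srivastava", "anita marwaha", "vinod kumar", "archita kumar",
   "deeksha jain", "placement team", "sanjay dawar", "breg. sanjay dawar"]

def timeKeywords : List String :=
  ["days ago", "hours ago", "minutes ago", "yesterday",
   "today", "hrs", "mins", "ago"]

-- first loop of A: over content_lines[:5], break on first match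
def aTitleLoop : List String → String
  | [] => "Untitled Post"
  | l :: rest =>
    if (titlePatterns.any (fun p => PySem.Str.isIn p (PySem.Str.lower l)))
        && decide (PySem.Str.len l > 20)
    then PySem.Str.slice l none (some 100)
    else aTitleLoop rest

-- second/third loop of A: first line containing one of kws (lower-cased), stripped; else dflt
def aScan (kws : List String) (dflt : String) : List String → String
  | [] => dflt
  | l :: rest =>
    if kws.any (fun k => PySem.Str.isIn k (PySem.Str.lower l))
    then PySem.Str.strip l
    else aScan kws dflt rest

def extract_post_metadata_from_raw (content_lines : List String) : String × String × String :=
  (aTitleLoop (PySem.List.slice content_lines none (some 5)),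
   aScan authorNames "" content_lines,
   aScan timeKeywords "" content_lines)

-- ===== PORT B =====
def bHit (kws : List String) (low : String) : Bool :=
  kws.any (fun k => PySem.Str.isIn k low)

-- the 'if title is None and idx < 5 and len(line) > 20 and any(...)' update of B
def bUpdT (idx : Nat) (t? : Option String) (l low : String) : Option String :=
  if t?.isNone && decide (idx < 5) && decide (PySem.Str.len l > 20) && bHit titlePatterns low
  then some (PySem.Str.slice l none (some 100)) else t?

-- the 'if author/posted_time is None and any(...)' updates of B
def bUpd (kws : List String) (a? : Option String) (l low : String) : Option String :=
  if a?.isNone && bHit kws low then some (PySem.Str.strip l) else a?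

def bLoop : Nat → Option String → Option String → Option String → List String → String × String × String
  | _, t?, a?, p?, [] => (t?.getD "Untitled Post", a?.getD "", p?.getD "")
  | idx, t?, a?, p?, l :: rest =>
    let low := PySem.Str.lower l
    let t?' := bUpdT idx t? l low
    let a?' := bUpd authorNames a? l low
    let p?' := bUpd timeKeywords p? l low
    if t?'.isSome && a?'.isSome && p?'.isSome then
      (t?'.getD "Untitled Post", a?'.getD "", p?'.getD "")
    else bLoop (idx + 1) t?' a?' p?' rest

def extract_post_metadata_from_raw_alt (content_lines : List String) : String × String × String :=
  bLoop 0 none none none content_lines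

-- ===== PRECONDITION & SPEC =====
def Spec_extract_post_metadata_from_raw (content_lines : List String) (out : String × String × String) : Prop := out = extract_post_metadata_from_raw_alt content_lines
instance (content_lines : List String) (out : String × String × String) : Decidable (Spec_extract_post_metadata_from_raw content_lines out) := by unfold Spec_extract_post_metadata_from_raw; infer_instance

-- ===== CLAIM (what is proved, stated in full; the proofs are below) =====
def Claim_equal_extract_post_metadata_from_raw : Prop := ∀ (content_lines : List String), Dom_extract_post_metadata_from_raw content_lines → Spec_extract_post_metadata_from_raw content_lines (extract_post_metadata_from_raw content_lines)

-- ===== LEMMAS AND PROOFS =====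

-- updating the title Option and then defaulting to A's scan of the remaining window
-- equals defaulting to A's scan of the whole window
lemma getD_bUpdT (idx : Nat) (t? : Option String) (l : String) (rest : List String) :
    (bUpdT idx t? l (PySem.Str.lower l)).getD (aTitleLoop (rest.take (5 - (idx + 1))))
      = t?.getD (aTitleLoop ((l :: rest).take (5 - idx))) := by
  cases t? with
  | some t => simp [bUpdT]
  | none =>
    by_cases h5 : idx < 5
    · have h : 5 - idx = (5 - (idx + 1)) + 1 := by omega
      rw [h, List.take_succ_cons]
      simp only [bUpdT, bHit, aTitleLoop, Option.isNone_none, Bool.true_and]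
      split_ifs with hB hA hA
      · simp
      · exfalso; apply hA
        rw [Bool.and_eq_true, Bool.and_eq_true] at hB
        rw [Bool.and_eq_true]
        exact ⟨hB.2, hB.1.2⟩
      · exfalso; apply hB
        rw [Bool.and_eq_true] at hA
        rw [Bool.and_eq_true, Bool.and_eq_true]
        exact ⟨⟨decide_eq_true h5, hA.2⟩, hA.1⟩
      · simp
    · have h0 : 5 - idx = 0 := by omega
      have h1 : 5 - (idx + 1) = 0 := by omega
      simp [bUpdT, h5, h0, h1]

lemma getD_bUpd (kws : List String) (dflt : String) (a? : Option String) (l : String)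
    (rest : List String) :
    (bUpd kws a? l (PySem.Str.lower l)).getD (aScan kws dflt rest)
      = a?.getD (aScan kws dflt (l :: rest)) := by
  cases a? with
  | some a => simp [bUpd]
  | none =>
    simp only [bUpd, bHit, aScan, Option.isNone_none, Bool.true_and]
    split_ifs with h1 <;> simp

lemma bLoop_eq (ls : List String) : ∀ (idx : Nat) (t? a? p? : Option String),
    bLoop idx t? a? p? ls
      = (t?.getD (aTitleLoop (ls.take (5 - idx))),
         a?.getD (aScan authorNames "" ls),
         p?.getD (aScan timeKeywords "" ls)) := by
  induction ls with
  | nil => intro idx t? a? p?; simp [bLoop, aTitleLoop, aScan]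
  | cons l rest ih =>
    intro idx t? a? p?
    rw [show bLoop idx t? a? p? (l :: rest)
        = (let low := PySem.Str.lower l
           let t?' := bUpdT idx t? l low
           let a?' := bUpd authorNames a? l low
           let p?' := bUpd timeKeywords p? l low
           if t?'.isSome && a?'.isSome && p?'.isSome then
             (t?'.getD "Untitled Post", a?'.getD "", p?'.getD "")
           else bLoop (idx + 1) t?' a?' p?' rest) from rfl]
    simp only []
    split_ifs with hb
    · simp only [Bool.and_eq_true, Option.isSome_iff_exists] at hb
      obtain ⟨⟨⟨t, ht⟩, a, ha⟩, p, hp⟩ := hb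
      rw [← getD_bUpdT idx t? l rest, ← getD_bUpd authorNames "" a? l rest,
          ← getD_bUpd timeKeywords "" p? l rest]
      simp [ht, ha, hp]
    · rw [ih, getD_bUpdT, getD_bUpd, getD_bUpd]

lemma slice5_eq_take (cl : List String) :
    PySem.List.slice cl none (some 5) = cl.take 5 := by
  have := PySem.List.slice_to cl (b := 5) (by norm_num)
  simpa using this

-- ===== VERDICT (by name: the statement is the Claim_ definition above) =====
theorem extract_post_metadata_from_raw_spec : Claim_equal_extract_post_metadata_from_raw := by
  intro cl _
  show extract_post_metadata_from_raw cl = extract_post_metadata_from_raw_alt cl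
  rw [extract_post_metadata_from_raw_alt, bLoop_eq]
  simp [extract_post_metadata_from_raw, slice5_eq_take]
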